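-- pv_equiv track=rewrite | github.com/Yoo-han-jun/codetree-TILs | 240721/함수를 이용한 합과 소수 판별/use-functions-to-determine-sums-and-decimals.py | f
-- ===== SOURCE A (Python) =====
-- def f(a,b):
--
--     s = 0
--     for i in range(a,b+1):
--         cnt = 0
--         for j in range(2, i):
--             if i%j==0:
--                 cnt+=1
--         if cnt == 0 and (i%10 + i//10)%2==0:
--             s+=1
--     return s
-- ===== SOURCE B (Python) =====
-- def f(a, b):
--     # Sieve: collect every composite number up to b once, then one pass over [a, b].
--     if b < a:
--         return 0
--     composite = set()
--     for j in range(2, b + 1):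
--         for m in range(2 * j, b + 1, j):
--             composite.add(m)
--     s = 0
--     for i in range(a, b + 1):
--         if i not in composite and (i % 10 + i // 10) % 2 == 0:
--             s += 1
--     return s
-- ===== Notes on version B (the rewrite author's own statement) =====
-- stated objective: faster
-- what changed: Replaces A's per-element trial division over range(2,i) by a sieve that collects all composite numbers up to b into a set once, then a single membership-test pass over [a,b].
import Mathlib
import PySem

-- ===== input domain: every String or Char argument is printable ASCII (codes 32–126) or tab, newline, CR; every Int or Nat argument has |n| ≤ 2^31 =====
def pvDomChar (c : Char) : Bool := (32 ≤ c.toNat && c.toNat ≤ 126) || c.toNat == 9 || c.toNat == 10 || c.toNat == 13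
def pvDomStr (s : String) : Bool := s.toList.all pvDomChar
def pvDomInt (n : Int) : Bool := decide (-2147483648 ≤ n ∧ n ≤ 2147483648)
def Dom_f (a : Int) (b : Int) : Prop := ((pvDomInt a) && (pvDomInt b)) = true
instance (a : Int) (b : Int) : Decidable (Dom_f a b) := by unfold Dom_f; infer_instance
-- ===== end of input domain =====

-- B replaces A's per-element trial division by a single sieve pass collecting the
-- composite numbers up to b into a set (objective: faster, O(b log b) vs O((b-a)·b)).

-- ===== PORT A =====
-- literal transliteration of A: outer loop over range(a, b+1), inner divisor count.
def f (a : Int) (b : Int) : Int :=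
  (PySem.List.pyRange a (b + 1) 1).foldl (fun s i =>
    let cnt : Int :=
      (PySem.List.pyRange 2 i 1).foldl (fun cnt j =>
        if PySem.Int.mod i j == 0 then cnt + 1 else cnt) 0
    if cnt == 0 && (PySem.Int.mod (PySem.Int.mod i 10 + PySem.Int.floordiv i 10) 2 == 0)
    then s + 1 else s) 0

-- ===== PORT B =====
-- B-side helper: the set of composites accumulated by B's sieving loops.
def pvComposites (b : Int) : PySem.Set Int :=
  (PySem.List.pyRange 2 (b + 1) 1).foldl (fun c j =>
    (PySem.List.pyRange (2 * j) (b + 1) j).foldl (fun c m => PySem.Set.add c m) c)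
    PySem.Set.empty

def f_alt (a : Int) (b : Int) : Int :=
  if b < a then 0 else
  let composite := pvComposites b
  (PySem.List.pyRange a (b + 1) 1).foldl (fun s i =>
    if !(PySem.Set.contains composite i)
        && (PySem.Int.mod (PySem.Int.mod i 10 + PySem.Int.floordiv i 10) 2 == 0)
    then s + 1 else s) 0

-- ===== PRECONDITION & SPEC =====
def Spec_f (a : Int) (b : Int) (out : Int) : Prop := out = f_alt a b
instance (a : Int) (b : Int) (out : Int) : Decidable (Spec_f a b out) := by unfold Spec_f; infer_instance

-- ===== CLAIM (what is proved, stated in full; the proofs are below) =====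
def Claim_equal_f : Prop := ∀ (a : Int) (b : Int), Dom_f a b → Spec_f a b (f a b)

-- ===== LEMMAS AND PROOFS =====

-- membership after folding Set.add over a list
theorem mem_foldl_add (L : List Int) (S : PySem.Set Int) (x : Int) :
    x ∈ L.foldl (fun c m => PySem.Set.add c m) S ↔ x ∈ S ∨ x ∈ L := by
  induction L generalizing S with
  | nil => simp
  | cons m L ih =>
    simp [List.foldl_cons, ih, PySem.Set.mem_add, List.mem_cons]
    tauto

-- membership after the double sieving fold, accumulator generalized
theorem mem_foldl_sieve (g : Int → List Int) (L : List Int) (S : PySem.Set Int) (x : Int) :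
    x ∈ L.foldl (fun c j => (g j).foldl (fun c m => PySem.Set.add c m) c) S ↔
      x ∈ S ∨ ∃ j ∈ L, x ∈ g j := by
  induction L generalizing S with
  | nil => simp
  | cons j L ih =>
    simp only [List.foldl_cons, ih, mem_foldl_add, List.mem_cons]
    constructor
    · rintro (((h | h) | ⟨j', hj', hx⟩))
      · exact Or.inl h
      · exact Or.inr ⟨j, Or.inl rfl, h⟩
      · exact Or.inr ⟨j', Or.inr hj', hx⟩
    · rintro (h | ⟨j', (rfl | hj'), hx⟩)
      · exact Or.inl (Or.inl h)
      · exact Or.inl (Or.inr hx)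
      · exact Or.inr ⟨j', hj', hx⟩

-- membership in the sieve's accumulated set
theorem mem_pvComposites (b x : Int) :
    x ∈ pvComposites b ↔
      ∃ j ∈ PySem.List.pyRange 2 (b + 1) 1, x ∈ PySem.List.pyRange (2 * j) (b + 1) j := by
  unfold pvComposites
  rw [mem_foldl_sieve (fun j => PySem.List.pyRange (2 * j) (b + 1) j)]
  simp [PySem.Set.empty]

-- arithmetic characterization of sieve membership, for x ≤ b
theorem mem_pvComposites_iff (b x : Int) (hx : x ≤ b) :
    x ∈ pvComposites b ↔ ∃ j : Int, 2 ≤ j ∧ j < x ∧ j ∣ x := by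
  rw [mem_pvComposites]
  constructor
  · rintro ⟨j, hjL, hxm⟩
    rw [PySem.List.mem_pyRange_one] at hjL
    have hj2 : (2:Int) ≤ j := hjL.1
    have hjpos : (0:Int) < j := by omega
    rw [PySem.List.mem_pyRange_iff_of_pos hjpos] at hxm
    obtain ⟨h1, h2, h3⟩ := hxm
    refine ⟨j, hj2, by omega, ?_⟩
    have : j ∣ x - 2 * j + 2 * j := Dvd.dvd.add h3 ⟨2, by ring⟩
    simpa using this
  · rintro ⟨j, hj2, hjx, hdvd⟩
    have hjpos : (0:Int) < j := by omega
    obtain ⟨m, hm⟩ := hdvd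
    have hm2 : 2 ≤ m := by nlinarith
    have h2j : 2 * j ≤ x := by nlinarith
    refine ⟨j, ?_, ?_⟩
    · rw [PySem.List.mem_pyRange_one]; omega
    · rw [PySem.List.mem_pyRange_iff_of_pos hjpos]
      exact ⟨h2j, by omega, ⟨m - 2, by rw [hm]; ring⟩⟩

-- A's counting fold is a countP
theorem foldl_count (p : Int → Bool) (L : List Int) (init : Int) :
    L.foldl (fun c j => if p j then c + 1 else c) init = init + (L.countP p : Int) := by
  induction L generalizing init with
  | nil => simp
  | cons j L ih =>
    simp only [List.foldl_cons, List.countP_cons, ih]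
    by_cases h : p j <;> simp [h]
    ring

-- A's divisor count for i is zero iff i is not in B's composite set (for i ≤ b)
theorem cnt_zero_iff (b i : Int) (hi : i ≤ b) :
    ((PySem.List.pyRange 2 i 1).foldl (fun cnt j =>
        if PySem.Int.mod i j == 0 then cnt + 1 else cnt) (0:Int) == 0)
      = !(PySem.Set.contains (pvComposites b) i) := by
  rw [Bool.eq_iff_iff]
  have hfc := foldl_count (fun j => PySem.Int.mod i j == 0) (PySem.List.pyRange 2 i 1) 0
  rw [hfc]
  simp only [beq_iff_eq, Bool.not_eq_eq_eq_not, Bool.not_true, zero_add]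
  rw [← Bool.not_eq_true, PySem.Set.contains_iff, mem_pvComposites_iff b i hi]
  have : ((PySem.List.pyRange 2 i 1).countP (fun j => PySem.Int.mod i j == 0) : Int) = 0
      ↔ (PySem.List.pyRange 2 i 1).countP (fun j => PySem.Int.mod i j == 0) = 0 := by
    exact_mod_cast Iff.rfl
  rw [this, List.countP_eq_zero]
  constructor
  · rintro h ⟨j, hj2, hji, hdvd⟩
    have hmem : j ∈ PySem.List.pyRange 2 i 1 := by rw [PySem.List.mem_pyRange_one]; omega
    have hj := h j hmem
    simp only [beq_iff_eq, PySem.Int.mod_eq_zero_iff_dvd] at hj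
    exact hj hdvd
  · intro h j hj
    rw [PySem.List.mem_pyRange_one] at hj
    simp only [beq_iff_eq, PySem.Int.mod_eq_zero_iff_dvd]
    intro hdvd
    exact h ⟨j, hj.1, hj.2, hdvd⟩

-- ===== VERDICT (by name: the statement is the Claim_ definition above) =====
theorem f_spec : Claim_equal_f := by
  intro a b _
  unfold Spec_f f f_alt
  by_cases hba : b < a
  · simp [hba, PySem.List.pyRange_one_eq_nil (by omega : b + 1 ≤ a)]
  simp only [hba, if_false]
  apply PySem.List.foldl_congr_mem
  intro s i hi
  rw [PySem.List.mem_pyRange_one] at hi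
  simp only [cnt_zero_iff b i (by omega)]
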